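-- pv_equiv track=rewrite | github.com/RaffaLinux/Tesi | Kitsune/AprioriX.py | labels_to_clusters
-- ===== SOURCE A (Python) =====
-- def labels_to_clusters(labels):
--     clusters = dict()
--
--     for i in range(len(labels)):
--
--         if labels[i] not in clusters.keys():
--             clusters[labels[i]] = [i]
--         else:
--             clusters[labels[i]].append(i)
--
--     if check_cluster_degeneri(clusters):
--         raise Exception("CLUSTER DEGENERE ")
--
--     return clusters
--
-- def check_cluster_degeneri(clusters):
--     d_clusters = 0
--
--     for i in clusters.copy().keys():
--         if len(clusters[i]) == 1:
--             d_clusters += 1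
--
--     return d_clusters > 0
-- ===== SOURCE B (Python) =====
-- def labels_to_clusters(labels):
--     order = list(dict.fromkeys(labels))
--     if any(labels.count(x) == 1 for x in order):
--         raise Exception("CLUSTER DEGENERE ")
--     return {x: [i for i, y in enumerate(labels) if y == x] for x in order}
-- ===== Notes on version B (the rewrite author's own statement) =====
-- stated objective: idiomatic
-- what changed: Replaces the incremental dict-grouping loop and the separate singleton-counting helper with an ordered dedup of the labels, an up-front any() singleton check, and a dict comprehension that gathers each label's indices by filtering enumerate.
import Mathlib
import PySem

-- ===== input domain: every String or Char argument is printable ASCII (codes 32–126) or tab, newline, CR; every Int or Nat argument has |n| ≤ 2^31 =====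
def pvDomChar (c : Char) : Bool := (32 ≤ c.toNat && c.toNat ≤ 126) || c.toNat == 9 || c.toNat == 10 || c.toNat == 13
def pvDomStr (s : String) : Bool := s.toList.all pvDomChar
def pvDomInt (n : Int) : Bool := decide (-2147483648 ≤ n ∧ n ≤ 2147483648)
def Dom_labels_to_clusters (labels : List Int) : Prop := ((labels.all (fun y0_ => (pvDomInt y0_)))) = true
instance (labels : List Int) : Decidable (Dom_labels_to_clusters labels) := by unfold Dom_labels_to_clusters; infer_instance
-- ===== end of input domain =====

-- B replaces A's incremental dict-grouping loop + separate singleton-counting helper by an ordered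
-- dedup of the labels, an up-front any() singleton check, and a dict comprehension that gathers each
-- label's indices by filtering enumerate (objective: idiomatic).  Where the Python A raises
-- Exception("CLUSTER DEGENERE ") — some cluster is a singleton — B raises too; both ports return []
-- there, and Pre_labels_to_clusters excludes those inputs.

-- ===== PORT A =====
def check_cluster_degeneri (clusters : PySem.Dict Int (List Int)) : Bool :=
  -- d_clusters = 0; for i in clusters.copy().keys(): if len(clusters[i]) == 1: d_clusters += 1
  let d_clusters : Int :=
    clusters.keys.foldl (fun d_clusters i =>
      if (clusters.getD i []).length == 1 then d_clusters + 1 else d_clusters) 0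
  decide (d_clusters > 0)   -- return d_clusters > 0

-- the grouping loop of labels_to_clusters: for i in range(len(labels)): …
def ltcDict (labels : List Int) : PySem.Dict Int (List Int) :=
  (PySem.List.pyRange 0 (PySem.List.len labels) 1).foldl (fun clusters i =>
      let x := PySem.List.pyGetD labels i 0   -- labels[i]; i ∈ range(len(labels)) so in range
      if clusters.contains x = false then clusters.insert x [i]   -- clusters[labels[i]] = [i]
      else clusters.modify x [] (fun l => l ++ [i]))              -- clusters[labels[i]].append(i)
      PySem.Dict.empty

def labels_to_clusters (labels : List Int) : List (Int × List Int) :=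
  let clusters := ltcDict labels
  if check_cluster_degeneri clusters then []   -- raise Exception("CLUSTER DEGENERE ")
  else clusters.items

-- ===== PORT B =====
def labels_to_clusters_alt (labels : List Int) : List (Int × List Int) :=
  let order := PySem.List.dedup labels                  -- list(dict.fromkeys(labels))
  if order.any (fun x => PySem.List.count labels x == 1) then []   -- raise Exception(...)
  else order.map (fun x =>
    (x, ((PySem.List.enumerate labels).filter (fun p => p.2 == x)).map (fun p => p.1)))

-- ===== PRECONDITION & SPEC =====
-- Pre_ excludes exactly the inputs on which the Python A raises Exception("CLUSTER DEGENERE "):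
-- those where some label occurs exactly once (B raises the same exception there).
def Pre_labels_to_clusters (labels : List Int) : Prop :=
  ∀ x ∈ labels, labels.count x ≠ 1
instance (labels : List Int) : Decidable (Pre_labels_to_clusters labels) := by
  unfold Pre_labels_to_clusters; infer_instance
def pvWitness_labels_to_clusters : List Int := [3, 3, 5, 5, 3]

def Spec_labels_to_clusters (labels : List Int) (out : List (Int × List Int)) : Prop := out = labels_to_clusters_alt labels
instance (labels : List Int) (out : List (Int × List Int)) : Decidable (Spec_labels_to_clusters labels out) := by unfold Spec_labels_to_clusters; infer_instance

-- ===== CLAIM (what is proved, stated in full; the proofs are below) =====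
def Claim_equal_labels_to_clusters : Prop := ∀ (labels : List Int), Dom_labels_to_clusters labels → Pre_labels_to_clusters labels → Spec_labels_to_clusters labels (labels_to_clusters labels)

-- ===== LEMMAS AND PROOFS =====

-- inserting a fresh key is the same dict as modify with default []
theorem insert_eq_modify (d : PySem.Dict Int (List Int)) (x i : Int) (h : d.contains x = false) :
    d.insert x [i] = d.modify x [] (fun l => l ++ [i]) := by
  simp [PySem.Dict.insert, PySem.Dict.modify, h, PySem.Dict.getD_of_not_contains d [] h]

-- the grouping loop as a pure modify-fold over (label, index) pairs
theorem ltcDict_eq (labels : List Int) :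
    ltcDict labels =
      ((PySem.List.enumerate labels).map (fun p => (p.2, p.1))).foldl
        (fun d p => d.modify p.1 [] (fun l => l ++ [p.2])) PySem.Dict.empty := by
  rw [List.foldl_map, PySem.List.enumerate_eq_map_pyRange labels 0, List.foldl_map]
  unfold ltcDict
  congr 1
  funext d i
  by_cases h : d.contains (PySem.List.pyGetD labels i 0) = false
  · simp only [h, if_true, insert_eq_modify d _ i h]
  · simp [h]

theorem keys_ltcDict (labels : List Int) :
    (ltcDict labels).keys = PySem.List.dedup labels := by
  rw [ltcDict_eq]
  have h := PySem.Dict.keys_foldl_modify_key ((PySem.List.enumerate labels).map (fun p => (p.2, p.1)))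
      (fun p : Int × Int => p.1) ([] : List Int) (fun d p => fun l => l ++ [p.2]) PySem.Dict.empty
  rw [h, List.map_map, show ((fun (p : Int × Int) => p.1) ∘ fun (p : Int × Int) => (p.2, p.1)) = (fun p => p.2) from rfl,
      PySem.List.map_snd_enumerate]
  rfl

theorem getD_ltcDict (labels : List Int) (c : Int) :
    (ltcDict labels).getD c [] =
      ((PySem.List.enumerate labels).filter (fun p => p.2 == c)).map (fun p => p.1) := by
  rw [ltcDict_eq, PySem.Dict.getD_foldl_modify_append]
  rw [List.filter_map, List.map_map]
  simp [PySem.Dict.getD_empty]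
  rfl

theorem len_getD_ltcDict (labels : List Int) (c : Int) :
    ((ltcDict labels).getD c []).length = labels.count c := by
  rw [getD_ltcDict, List.length_map, ← List.countP_eq_length_filter]
  conv_rhs => rw [List.count_eq_countP, ← PySem.List.map_snd_enumerate labels 0, List.countP_map]
  rfl

theorem decide_countP (l : List Int) (p : Int → Bool) :
    decide ((0:Int) < (0 + (l.countP p : Int))) = l.any p := by
  by_cases h : l.any p = true
  · simp only [h]
    rw [List.any_eq_true] at h
    have := List.countP_pos_iff.mpr h
    simp; omega
  · simp only [eq_false_of_ne_true h]
    rw [Bool.not_eq_true, List.any_eq_false] at h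
    have : l.countP p = 0 := by
      by_contra hc
      rcases List.countP_pos_iff.mp (Nat.pos_of_ne_zero hc) with ⟨a, ha, hpa⟩
      exact (h a ha) hpa
    simp [this]

theorem check_eq (labels : List Int) :
    check_cluster_degeneri (ltcDict labels)
      = (PySem.List.dedup labels).any (fun x => PySem.List.count labels x == 1) := by
  unfold check_cluster_degeneri
  rw [PySem.List.foldl_count_if (fun i => (((ltcDict labels).getD i []).length == 1))]
  rw [show (fun i => (((ltcDict labels).getD i []).length == 1))
        = (fun x => PySem.List.count labels x == 1) from
      funext fun x => by rw [len_getD_ltcDict, PySem.List.count_eq]]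
  rw [keys_ltcDict]
  exact decide_countP _ _

theorem ltc_eq_alt (labels : List Int) :
    labels_to_clusters labels = labels_to_clusters_alt labels := by
  show (if check_cluster_degeneri (ltcDict labels) then [] else (ltcDict labels).items)
      = (if (PySem.List.dedup labels).any (fun x => PySem.List.count labels x == 1) then []
         else (PySem.List.dedup labels).map (fun x =>
           (x, ((PySem.List.enumerate labels).filter (fun p => p.2 == x)).map (fun p => p.1))))
  rw [check_eq]
  by_cases h : (PySem.List.dedup labels).any (fun x => PySem.List.count labels x == 1) = true
  · simp only [h, if_true]
  · simp only [eq_false_of_ne_true h]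
    have hnd : (ltcDict labels).keys.Nodup := keys_ltcDict labels ▸ PySem.List.nodup_dedup labels
    rw [PySem.Dict.items_eq_map_keys (ltcDict labels) hnd ([] : List Int), keys_ltcDict]
    exact List.map_congr_left fun x _ => by rw [getD_ltcDict]

-- ===== VERDICT (by name: the statement is the Claim_ definition above) =====
theorem labels_to_clusters_spec : Claim_equal_labels_to_clusters := by
  intro labels _ _
  unfold Spec_labels_to_clusters
  exact ltc_eq_alt labels
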